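-- pv_equiv track=rewrite | github.com/LuWinter/AI-SocialEconomic-Frontier | paper_framer.py | layer_key_name_first_strategy
-- ===== SOURCE A (Python) =====
-- def layer_key_name_first_strategy(document_title_no_layer,true_layer):
--     count = 0
--     update_title = []
--     layer_count = true_layer[0]
--     last_name = []
--     for original in document_title_no_layer[:-1]:
--         if true_layer[count+1] == layer_count:
--             update_title.append('-'.join(last_name) + " - " +document_title_no_layer[count])
--         elif true_layer[count+1] > layer_count:
--             update_title.append('-'.join(last_name) + " - " +document_title_no_layer[count])
--             last_name.append(document_title_no_layer[count])
--             layer_count = layer_count+1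
--         elif true_layer[count+1]<layer_count:
--             update_title.append('-'.join(last_name) + " - " + document_title_no_layer[count])
--             while true_layer[count+1]!=layer_count:
--                 last_name.pop()
--                 layer_count = layer_count-1
--         count = count+1
--     new_update_title = []
--     for element in update_title:
--         if element[0] == '-':
--             new_update_title.append(element[1:])
--         else:
--             new_update_title.append(element)
--
--     return new_update_title
-- ===== SOURCE B (Python) =====
-- def layer_key_name_first_strategy(document_title_no_layer, true_layer):
--     # Pass 1: effective-depth profile. A's branch/while-pop update of layer_count
--     # collapses to the closed recurrence  depth[i+1] = min(true_layer[i+1], depth[i] + 1).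
--     depths = [true_layer[0]]
--     for lv in true_layer[1:len(document_title_no_layer)]:
--         depths.append(min(lv, depths[-1] + 1))
--     # Pass 2: the cached joined-prefix length per depth; a drop in depth is a single
--     # dict lookup instead of A's pop loop, a rise extends the current prefix.
--     base = depths[0]
--     seen = {base: 0}
--     pref = ""
--     out = []
--     for title, d, d1 in zip(document_title_no_layer, depths, depths[1:]):
--         entry = pref + " - " + title
--         out.append(entry[1:] if entry[0] == '-' else entry)
--         if d1 > d:
--             pref = title if d == base else pref + '-' + title
--             seen[d1] = len(pref)
--         elif d1 < d:
--             pref = pref[:seen[d1]]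
--     return out
-- ===== Notes on version B (the rewrite author's own statement) =====
-- stated objective: alternative
-- what changed: B is a two-phase algorithm: it first collapses A's branch-and-pop-while depth bookkeeping into the closed recurrence depth[i+1]=min(tl[i+1],depth[i]+1) producing a depth profile, then builds titles with one cached joined prefix per depth in a dict, so A's name stack, its pop loop and its per-step '-'.join and the separate strip pass all disappear.
import Mathlib
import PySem

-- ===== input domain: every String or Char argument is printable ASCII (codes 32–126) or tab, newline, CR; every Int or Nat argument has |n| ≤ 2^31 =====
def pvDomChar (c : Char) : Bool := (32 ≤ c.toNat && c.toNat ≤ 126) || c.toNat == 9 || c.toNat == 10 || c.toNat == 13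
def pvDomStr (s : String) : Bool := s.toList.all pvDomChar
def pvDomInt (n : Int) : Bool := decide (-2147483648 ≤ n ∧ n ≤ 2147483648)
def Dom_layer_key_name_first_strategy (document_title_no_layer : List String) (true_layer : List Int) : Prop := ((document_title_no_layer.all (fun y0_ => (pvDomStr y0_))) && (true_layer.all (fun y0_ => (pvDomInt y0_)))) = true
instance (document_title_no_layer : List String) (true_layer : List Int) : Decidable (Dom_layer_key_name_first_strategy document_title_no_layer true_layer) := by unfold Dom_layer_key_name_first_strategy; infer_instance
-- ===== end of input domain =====

-- B replaces A's name-stack walk (per-step '-'.join, pop-while loop, second strip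
-- pass) by two flat passes: a depth profile from the closed recurrence
-- depth[i+1] = min(tl[i+1], depth[i]+1), then one cached joined prefix per depth
-- in a dict; equivalence is proved on Pre_ (exactly the inputs where A raises no
-- IndexError). Strings are ported exactly on the List Char level (String.ofList).

-- ===== PORT A =====
-- '-'.join(last_name), on code points (exact: join of the names' character lists)
def pvJoinDash (ln : List String) : List Char :=
  PySem.Chars.join ['-'] (ln.map String.toList)

-- "element[1:] if element[0] == '-' else element" — the body of A's second loop
-- (and the identical inline conditional in B); pyGet?/slice are Python-exact.
def pvStripElem (e : List Char) : String :=
  if PySem.List.pyGet? e 0 = some '-' then String.ofList (PySem.List.slice e (some 1) none)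
  else String.ofList e

-- 'while true_layer[count+1] != layer_count: last_name.pop(); layer_count -= 1'
-- none = Python's IndexError on pop from the empty list
def pvPopWhile (target : Int) (ln : List String) (lc : Int) : Option (List String × Int) :=
  if target = lc then some (ln, lc)
  else
    match ln with
    | [] => none
    | x :: xs => pvPopWhile target (x :: xs).dropLast (lc - 1)
termination_by ln.length
decreasing_by simp [List.length_dropLast]

-- A's main loop over doc[:-1]; none = an IndexError was raised (unreachable inside Pre_)
def pvLoopA (doc : List String) (tl : List Int) :
    List String → Nat → List (List Char) → Int → List String → Option (List (List Char))
  | [], _, upd, _, _ => some upd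
  | _ :: rest, count, upd, lc, ln =>
    match PySem.List.pyGet? tl ((count : Int) + 1), PySem.List.pyGet? doc (count : Int) with
    | some nxt, some name =>
      let entry := pvJoinDash ln ++ (' ' :: '-' :: ' ' :: name.toList)
      if nxt = lc then
        pvLoopA doc tl rest (count + 1) (upd ++ [entry]) lc ln
      else if nxt > lc then
        pvLoopA doc tl rest (count + 1) (upd ++ [entry]) (lc + 1) (ln ++ [name])
      else if nxt < lc then
        match pvPopWhile nxt ln lc with
        | some (ln', lc') => pvLoopA doc tl rest (count + 1) (upd ++ [entry]) lc' ln'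
        | none => none
      else
        pvLoopA doc tl rest (count + 1) upd lc ln
    | _, _ => none

def layer_key_name_first_strategy (document_title_no_layer : List String) (true_layer : List Int) : List String :=
  match PySem.List.pyGet? true_layer 0 with
  | none => []   -- true_layer[0] raised IndexError
  | some lc0 =>
    match pvLoopA document_title_no_layer true_layer
        (PySem.List.slice document_title_no_layer none (some (-1))) 0 [] lc0 [] with
    | some upd => upd.map pvStripElem   -- A's second loop: strip a leading '-'
    | none => []

-- ===== PORT B =====
-- pass 1: "for lv in true_layer[1:len(doc)]: d = min(lv, d + 1); depths.append(d)"
def pvDepthsLoop (lvs : List Int) (acc : List Int) (d : Int) : List Int :=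
  match lvs with
  | [] => acc
  | lv :: rest => pvDepthsLoop rest (acc ++ [min lv (d + 1)]) (min lv (d + 1))

-- pass 2: "for title, d, d1 in zip(doc, depths, depths[1:]): …" — recursion over the
-- three zipped lists (stops at the shortest, as zip does); none = KeyError on seen[d1]
def pvLoopB (base : Int) :
    List String → List Int → List Int → PySem.Dict Int Int → List Char →
      List String → Option (List String)
  | t :: ts, d :: ds, d1 :: d1s, seen, pref, out =>
    let entry := pref ++ (' ' :: '-' :: ' ' :: t.toList)
    let out' := out ++ [pvStripElem entry]
    if d1 > d then
      let pref' := if d = base then t.toList else pref ++ '-' :: t.toList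
      pvLoopB base ts ds d1s (seen.insert d1 (pref'.length : Int)) pref' out'
    else if d1 < d then
      match seen.get? d1 with
      | some L => pvLoopB base ts ds d1s seen (PySem.List.slice pref none (some L)) out'
      | none => none
    else
      pvLoopB base ts ds d1s seen pref out'
  | _, _, _, _, _, out => some out

def layer_key_name_first_strategy_alt (document_title_no_layer : List String) (true_layer : List Int) : List String :=
  match PySem.List.pyGet? true_layer 0 with
  | none => []   -- true_layer[0] raised IndexError
  | some t0 =>
    let depths := pvDepthsLoop
      (PySem.List.slice true_layer (some 1) (some (document_title_no_layer.length : Int))) [t0] t0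
    let base := PySem.List.pyGetD depths 0 0
    match pvLoopB base document_title_no_layer depths (PySem.List.slice depths (some 1) none)
        (PySem.Dict.empty.insert base 0) [] [] with
    | some out => out
    | none => []   -- KeyError (unreachable inside Pre_)

-- ===== PRECONDITION & SPEC =====
-- Pre_ excludes exactly the inputs on which A raises IndexError: an empty true_layer,
-- a true_layer shorter than the title list, or some accessed layer below true_layer[0]
-- (which makes A pop from an empty last_name stack). A returns on every other input.
def Pre_layer_key_name_first_strategy (document_title_no_layer : List String) (true_layer : List Int) : Prop :=
  true_layer ≠ [] ∧ document_title_no_layer.length ≤ true_layer.length ∧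
    ∀ i : Nat, i < document_title_no_layer.length → 1 ≤ i →
      true_layer.getD 0 0 ≤ true_layer.getD i 0
instance (document_title_no_layer : List String) (true_layer : List Int) : Decidable (Pre_layer_key_name_first_strategy document_title_no_layer true_layer) := by unfold Pre_layer_key_name_first_strategy; infer_instance

def pvWitness_layer_key_name_first_strategy : List String × List Int :=
  (["a", "b", "c"], [1, 2, 1])

def Spec_layer_key_name_first_strategy (document_title_no_layer : List String) (true_layer : List Int) (out : List String) : Prop := out = layer_key_name_first_strategy_alt document_title_no_layer true_layer
instance (document_title_no_layer : List String) (true_layer : List Int) (out : List String) : Decidable (Spec_layer_key_name_first_strategy document_title_no_layer true_layer out) := by unfold Spec_layer_key_name_first_strategy; infer_instance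

-- ===== CLAIM (what is proved, stated in full; the proofs are below) =====
def Claim_equal_layer_key_name_first_strategy : Prop := ∀ (document_title_no_layer : List String) (true_layer : List Int), Dom_layer_key_name_first_strategy document_title_no_layer true_layer → Pre_layer_key_name_first_strategy document_title_no_layer true_layer → Spec_layer_key_name_first_strategy document_title_no_layer true_layer (layer_key_name_first_strategy document_title_no_layer true_layer)

-- ===== LEMMAS AND PROOFS =====

-- the depth trace: pvTrace lvs d = [d, min(lvs[0], d+1), …] — what pass 1 builds
def pvTrace : List Int → Int → List Int
  | [], d => [d]
  | lv :: rest, d => d :: pvTrace rest (min lv (d + 1))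

theorem pvTrace_head (l : List Int) (d : Int) : pvTrace l d = d :: (pvTrace l d).tail := by
  cases l <;> rfl

theorem pvDepthsLoop_eq (lvs : List Int) : ∀ (acc : List Int) (d : Int),
    pvDepthsLoop lvs acc d = acc ++ (pvTrace lvs d).tail := by
  induction lvs with
  | nil => intro acc d; simp [pvDepthsLoop, pvTrace]
  | cons lv rest ih =>
    intro acc d
    rw [pvDepthsLoop, ih, pvTrace]
    rw [pvTrace_head rest (min lv (d + 1))]
    simp

theorem pvJoinDash_concat (ln : List String) (t : String) :
    pvJoinDash (ln ++ [t]) =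
      if ln = [] then t.toList else pvJoinDash ln ++ '-' :: t.toList := by
  induction ln with
  | nil => simp [pvJoinDash, PySem.Chars.join_singleton]
  | cons a as ih =>
    cases as with
    | nil =>
      simp [pvJoinDash, PySem.Chars.join_cons_cons, PySem.Chars.join_singleton]
    | cons b bs =>
      simp only [List.cons_ne_nil, ite_false] at ih ⊢
      simp only [pvJoinDash, List.cons_append, List.map_cons] at *
      rw [PySem.Chars.join_cons_cons, ih, PySem.Chars.join_cons_cons]
      simp [List.append_assoc]

theorem pvPopWhile_spec (k : Nat) : ∀ (ln : List String) (lc : Int), k ≤ ln.length →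
    pvPopWhile (lc - k) ln lc = some (ln.take (ln.length - k), lc - k) := by
  induction k with
  | zero =>
    intro ln lc _
    rw [pvPopWhile.eq_def]
    simp
  | succ k ih =>
    intro ln lc hk
    rw [pvPopWhile.eq_def, if_neg (by omega)]
    match ln, hk with
    | x :: xs, hk =>
      have h1 : lc - (↑(k+1) : Int) = (lc - 1) - k := by push_cast; ring
      rw [h1]
      show pvPopWhile ((lc - 1) - k) (x :: xs).dropLast (lc - 1) = _
      rw [ih _ (lc - 1) (by simp at hk ⊢; omega)]
      rw [List.dropLast_eq_take, List.take_take]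
      congr 2
      · congr 1
        simp

theorem pvJoinDash_take_prefix (ln : List String) (m : Nat) :
    pvJoinDash (ln.take m) <+: pvJoinDash ln := by
  induction ln generalizing m with
  | nil => simp
  | cons a as ih =>
    cases m with
    | zero =>
      simp only [List.take_zero]
      have : pvJoinDash [] = [] := rfl
      rw [this]
      exact List.nil_prefix
    | succ m =>
      cases as with
      | nil => simp
      | cons b bs =>
        cases m with
        | zero =>
          simp only [List.take_succ_cons, List.take_zero, pvJoinDash, List.map_cons,
            List.map_nil]
          rw [PySem.Chars.join_singleton, PySem.Chars.join_cons_cons]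
          exact (List.prefix_append _ _).trans (List.prefix_append _ _)
        | succ m =>
          have h := ih (m + 1)
          simp only [pvJoinDash, List.take_succ_cons, List.map_cons] at h ⊢
          rw [PySem.Chars.join_cons_cons, PySem.Chars.join_cons_cons]
          exact (List.prefix_append_right_inj _).mpr h

-- the loops agree step by step: B's depth pair (d, d1) is A's layer_count before and
-- after the step, seen caches the joined prefix of every reachable depth, and B's
-- out is A's upd with the strip applied; neither side raises inside Pre_
theorem pvLoop_eq (doc : List String) (tl : List Int) (tl0 : Int)
    (hlen : doc.length ≤ tl.length)
    (hge : ∀ i : Nat, i < doc.length → 1 ≤ i → tl0 ≤ tl.getD i 0) :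
    ∀ (rem : List String) (count : Nat) (upd : List (List Char)) (lc : Int)
      (ln : List String) (la : String) (seen : PySem.Dict Int Int),
      doc.drop count = rem ++ [la] →
      (ln.length : Int) = lc - tl0 →
      (∀ d : Int, tl0 ≤ d → d ≤ lc →
        seen.get? d = some ((pvJoinDash (ln.take (d - tl0).toNat)).length : Int)) →
      ∃ r, pvLoopA doc tl rem count upd lc ln = some r ∧
        pvLoopB tl0 (rem ++ [la]) (pvTrace ((tl.take doc.length).drop (count + 1)) lc)
            ((pvTrace ((tl.take doc.length).drop (count + 1)) lc).tail)
            seen (pvJoinDash ln) (upd.map pvStripElem)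
          = some (r.map pvStripElem) := by
  intro rem
  induction rem with
  | nil =>
    intro count upd lc ln la seen hdrop _ _
    have hcnt : doc.length = count + 1 := by
      have := congrArg List.length hdrop
      simp [List.length_drop] at this
      omega
    have hl : (tl.take doc.length).drop (count + 1) = [] := by
      apply List.drop_eq_nil_of_le
      simp
      omega
    rw [hl]
    exact ⟨upd, rfl, rfl⟩
  | cons original rest ih =>
    intro count upd lc ln la seen hdrop hln hseen
    have hcnt : count + rest.length + 2 = doc.length := by
      have := congrArg List.length hdrop
      simp [List.length_drop] at this
      omega
    have hlt : count + 1 < tl.length := by omega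
    have hdoc : PySem.List.pyGet? doc (count : Int) = some original := by
      rw [PySem.List.pyGet?_natCast]
      have : doc[count]? = (doc.drop count)[0]? := by
        rw [List.getElem?_drop]
        norm_num
      rw [this, hdrop]
      simp
    set nxt := tl.getD (count + 1) 0 with hnxtdef
    have htl : PySem.List.pyGet? tl ((count : Int) + 1) = some nxt := by
      have h1 : ((count : Int) + 1) = ((count + 1 : Nat) : Int) := by push_cast; ring
      rw [h1, PySem.List.pyGet?_natCast]
      rw [List.getElem?_eq_getElem (by omega)]
      rw [hnxtdef, List.getD_eq_getElem?_getD, List.getElem?_eq_getElem (by omega)]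
      simp
    have hnge : tl0 ≤ nxt := hge (count + 1) (by omega) (by omega)
    have hdrop' : doc.drop (count + 1) = rest ++ [la] := by
      have : doc.drop (count + 1) = (doc.drop count).drop 1 := by
        rw [List.drop_drop]
      rw [this, hdrop]
      simp
    have hlv : (tl.take doc.length).drop (count + 1)
        = nxt :: (tl.take doc.length).drop (count + 2) := by
      rw [List.drop_eq_getElem_cons (by simp; omega)]
      congr 1
      rw [List.getElem_take]
      rw [hnxtdef, List.getD_eq_getElem?_getD, List.getElem?_eq_getElem (by omega)]
      simp
    rw [hlv, pvTrace]
    rw [pvTrace_head ((tl.take doc.length).drop (count + 2)) (min nxt (lc + 1))]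
    simp only [pvLoopA, pvLoopB, htl, hdoc, List.cons_append, List.tail_cons]
    by_cases heq : nxt = lc
    · have hd1 : min nxt (lc + 1) = lc := by omega
      rw [hd1, if_pos heq, if_neg (by omega), if_neg (by omega)]
      obtain ⟨r, hA, hB⟩ := ih (count + 1)
        (upd ++ [pvJoinDash ln ++ (' ' :: '-' :: ' ' :: original.toList)]) lc ln la seen
        hdrop' hln hseen
      refine ⟨r, hA, ?_⟩
      rw [show count + 1 + 1 = count + 2 from by omega] at hB
      rw [← pvTrace_head]
      simpa using hB
    · by_cases hgt : nxt > lc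
      · have hd1 : min nxt (lc + 1) = lc + 1 := by omega
        rw [hd1, if_neg heq, if_pos hgt, if_pos (by omega)]
        have hnil : ln = [] ↔ lc = tl0 := by
          constructor
          · intro h; rw [h] at hln; simp at hln; omega
          · intro h
            have h0 : ln.length = 0 := by omega
            exact List.eq_nil_of_length_eq_zero h0
        have hpref : (if lc = tl0 then original.toList
            else pvJoinDash ln ++ '-' :: original.toList) = pvJoinDash (ln ++ [original]) := by
          rw [pvJoinDash_concat]
          by_cases h : ln = []
          · rw [if_pos (hnil.mp h), if_pos h]
          · rw [if_neg (fun hh => h (hnil.mpr hh)), if_neg h]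
        have hseen' : ∀ d : Int, tl0 ≤ d → d ≤ lc + 1 →
            (seen.insert (lc + 1) ((pvJoinDash (ln ++ [original])).length : Int)).get? d
              = some ((pvJoinDash ((ln ++ [original]).take (d - tl0).toNat)).length : Int) := by
          intro d hd1 hd2
          by_cases hdl : d = lc + 1
          · subst hdl
            rw [PySem.Dict.get?_insert_self]
            rw [List.take_of_length_le (by simp; omega)]
          · rw [PySem.Dict.get?_insert_of_ne _ _ hdl, hseen d hd1 (by omega)]
            rw [List.take_append_of_le_length (by omega)]
        obtain ⟨r, hA, hB⟩ := ih (count + 1)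
          (upd ++ [pvJoinDash ln ++ (' ' :: '-' :: ' ' :: original.toList)]) (lc + 1)
          (ln ++ [original]) la (seen.insert (lc + 1) ((pvJoinDash (ln ++ [original])).length : Int))
          hdrop' (by simp; omega) hseen'
        refine ⟨r, hA, ?_⟩
        rw [show count + 1 + 1 = count + 2 from by omega] at hB
        rw [hpref, ← pvTrace_head]
        simpa using hB
      · have hltc : nxt < lc := by omega
        have hd1 : min nxt (lc + 1) = nxt := by omega
        rw [hd1, if_neg heq, if_neg (by omega), if_pos hltc, if_neg (by omega), if_pos hltc]
        set kN : Nat := (lc - nxt).toNat with hkN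
        have hk1 : (kN : Int) = lc - nxt := by omega
        have hkle : kN ≤ ln.length := by omega
        have hpop : pvPopWhile nxt ln lc = some (ln.take (ln.length - kN), nxt) := by
          have := pvPopWhile_spec kN ln lc hkle
          rw [hk1] at this
          simpa using this
        have htk : ln.length - kN = (nxt - tl0).toNat := by omega
        rw [hpop, hseen nxt hnge (by omega)]
        have hseen' : ∀ d : Int, tl0 ≤ d → d ≤ nxt →
            seen.get? d = some ((pvJoinDash ((ln.take (ln.length - kN)).take (d - tl0).toNat)).length : Int) := by
          intro d hd1 hd2
          rw [List.take_take, htk, min_eq_left (by omega)]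
          exact hseen d hd1 (by omega)
        obtain ⟨r, hA, hB⟩ := ih (count + 1)
          (upd ++ [pvJoinDash ln ++ (' ' :: '-' :: ' ' :: original.toList)]) nxt
          (ln.take (ln.length - kN)) la seen hdrop'
          (by rw [List.length_take, min_eq_left (by omega)]; omega) hseen'
        refine ⟨r, hA, ?_⟩
        rw [show count + 1 + 1 = count + 2 from by omega] at hB
        rw [← htk] at *
        dsimp only
        have hsl : PySem.List.slice (pvJoinDash ln) none
            (some ((pvJoinDash (ln.take (ln.length - kN))).length : Int))
            = pvJoinDash (ln.take (ln.length - kN)) := by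
          rw [PySem.List.slice_to _ (Int.natCast_nonneg _), Int.toNat_natCast]
          exact (List.prefix_iff_eq_take.mp (pvJoinDash_take_prefix ln _)).symm
        rw [hsl, ← pvTrace_head]
        simpa using hB

-- ===== VERDICT (by name: the statement is the Claim_ definition above) =====
theorem layer_key_name_first_strategy_spec : Claim_equal_layer_key_name_first_strategy := by
  intro doc tl _hdom hpre
  obtain ⟨hne, hlen, hge⟩ := hpre
  unfold Spec_layer_key_name_first_strategy
  unfold layer_key_name_first_strategy layer_key_name_first_strategy_alt
  have h0 : PySem.List.pyGet? tl 0 = some (tl.getD 0 0) := by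
    rw [PySem.List.pyGet?_zero]
    cases tl with
    | nil => exact absurd rfl hne
    | cons a t => simp
  set tl0 := tl.getD 0 0 with htl0
  have hslice : PySem.List.slice tl (some 1) (some (doc.length : Int))
      = (tl.take doc.length).drop 1 := by
    have h1 : (1 : Int) = ((1 : Nat) : Int) := by norm_num
    rw [h1, PySem.List.slice_natCast, List.drop_take]
  rw [h0, PySem.List.slice_to_neg_one]
  dsimp only
  rw [hslice, pvDepthsLoop_eq]
  simp only [List.singleton_append]
  rw [PySem.List.pyGetD_zero_cons, PySem.List.slice_from_one, List.tail_cons]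
  by_cases hd : doc = []
  · subst hd
    have he : (tl.take 0).drop 1 = ([] : List Int) := by simp
    rw [List.length_nil, he, pvTrace]
    rfl
  · obtain ⟨r, hA, hB⟩ := pvLoop_eq doc tl tl0 hlen hge doc.dropLast 0 [] tl0 []
      (doc.getLast hd) (PySem.Dict.empty.insert tl0 0)
      (by rw [List.drop_zero, List.dropLast_append_getLast hd])
      (by simp)
      (by
        intro d hd1 hd2
        have : d = tl0 := by omega
        subst this
        rw [PySem.Dict.get?_insert_self, List.take_nil]
        rfl)
    rw [List.dropLast_append_getLast hd] at hB
    have hpj : pvJoinDash [] = ([] : List Char) := rfl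
    rw [hpj] at hB
    simp only [List.map_nil] at hB
    rw [pvTrace_head ((tl.take doc.length).drop 1) tl0] at hB
    simp only [List.tail_cons] at hB
    rw [hA, hB]
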